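-- pv_equiv track=rewrite | github.com/michaelayoade/dotmac_erp | scripts/fix_inline_badges.py | find_matching_endif
-- ===== SOURCE A (Python) =====
-- def find_matching_endif(content: str, if_start: int) -> int:
--     """Find the end position of the matching {%% endif %%}."""
--     depth = 0
--     pos = if_start
--     while pos < len(content):
--         tag_start = content.find("{%", pos)
--         if tag_start == -1:
--             return -1
--         tag_end = content.find("%}", tag_start + 2)
--         if tag_end == -1:
--             return -1
--         tag_end += 2
--
--         tag_body = (
--             content[tag_start + 2 : tag_end - 2].strip().lstrip("-").rstrip("-").strip()
--         )
--
--         if (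
--             tag_body.startswith("if ")
--             or tag_body.startswith("if\t")
--             or tag_body.startswith("if\n")
--         ):
--             depth += 1
--         elif tag_body == "endif" or tag_body.startswith("endif "):
--             depth -= 1
--             if depth == 0:
--                 return tag_end
--
--         pos = tag_end
--
--     return -1
-- ===== SOURCE B (Python) =====
-- def _scan_tags(content, pos):
--     """All complete '{%' ... '%}' tags at or after pos: (end position, normalised body)."""
--     tags = []
--     while pos < len(content):
--         ts = content.find("{%", pos)
--         if ts == -1:
--             break
--         te = content.find("%}", ts + 2)
--         if te == -1:
--             break
--         pos = te + 2
--         body = content[ts + 2 : te].strip().lstrip("-").rstrip("-").strip()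
--         tags.append((pos, body))
--     return tags
--
--
-- def _kind(body):
--     """+1 for an if tag, -1 for an endif tag, 0 otherwise."""
--     if body.startswith(("if ", "if\t", "if\n")):
--         return 1
--     if body == "endif" or body.startswith("endif "):
--         return -1
--     return 0
--
--
-- def find_matching_endif(content: str, if_start: int) -> int:
--     """The matching endif is the first endif tag preceded (since if_start) by
--     exactly one more if tag than endif tags."""
--     tags = _scan_tags(content, if_start)
--     kinds = [_kind(body) for _, body in tags]
--     for j, (end, _) in enumerate(tags):
--         if kinds[j] == -1 and sum(kinds[:j]) == 1:
--             return end
--     return -1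
-- ===== Notes on version B (the rewrite author's own statement) =====
-- stated objective: alternative
-- what changed: A's fused scan with a mutable depth counter and early return is replaced by a tokenize-then-declarative-search pipeline: the tag stream is extracted once, each tag is classified +1/0/-1, and the answer is the first endif tag preceded by exactly one more if tag than endif tags.
import Mathlib
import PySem

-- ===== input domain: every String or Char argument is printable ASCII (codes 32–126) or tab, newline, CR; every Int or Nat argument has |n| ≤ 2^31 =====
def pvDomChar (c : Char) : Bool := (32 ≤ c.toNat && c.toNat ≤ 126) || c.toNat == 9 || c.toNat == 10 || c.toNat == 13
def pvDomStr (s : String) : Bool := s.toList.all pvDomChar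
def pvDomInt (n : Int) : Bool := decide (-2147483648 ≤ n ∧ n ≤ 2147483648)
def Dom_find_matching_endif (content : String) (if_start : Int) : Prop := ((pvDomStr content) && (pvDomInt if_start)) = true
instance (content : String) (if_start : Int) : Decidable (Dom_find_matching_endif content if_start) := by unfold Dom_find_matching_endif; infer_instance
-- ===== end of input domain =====

-- B replaces A's fused scan with a mutable depth counter by tokenize-then-declarative-search
-- (same result; objective: alternative decomposition, not speed).

-- ===== PORT A =====
-- shared tag helpers: body normalisation and the two branch tests, exactly the Python expressions
-- s.lstrip("-") = drop leading '-' (hand port, exact: Python removes every leading char in {'-'})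
def pvHyStripL (xs : List Char) : List Char := xs.dropWhile (· == '-')
-- s.rstrip("-") = drop trailing '-' (hand port, exact)
def pvHyStripR (xs : List Char) : List Char := (xs.reverse.dropWhile (· == '-')).reverse
-- content[ts+2 : te-2].strip().lstrip("-").rstrip("-").strip()
def pvTagBody (cs : List Char) (ts te : Int) : List Char :=
  PySem.Chars.strip (pvHyStripR (pvHyStripL (PySem.Chars.strip
    (PySem.Chars.slice cs (some (ts + 2)) (some (te - 2))))))
def pvOpensIf (b : List Char) : Bool :=
  PySem.Chars.startswith b "if ".toList || PySem.Chars.startswith b "if\t".toList ||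
    PySem.Chars.startswith b "if\n".toList
def pvClosesIf (b : List Char) : Bool :=
  b == "endif".toList || PySem.Chars.startswith b "endif ".toList

-- A's while-loop; fuel strictly exceeds the iteration count (pos advances by ≥ 4 per tag)
def pvALoop (cs : List Char) : Nat → Int → Int → Int
  | 0, _, _ => -1
  | fuel + 1, pos, depth =>
    if pos < (cs.length : Int) then
      let ts := PySem.Chars.findFrom cs "{%".toList pos none
      if ts = -1 then -1
      else
        let te0 := PySem.Chars.findFrom cs "%}".toList (ts + 2) none
        if te0 = -1 then -1
        else
          let te := te0 + 2
          let body := pvTagBody cs ts te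
          if pvOpensIf body then pvALoop cs fuel te (depth + 1)
          else if pvClosesIf body then
            if depth - 1 = 0 then te else pvALoop cs fuel te (depth - 1)
          else pvALoop cs fuel te depth
    else -1

def find_matching_endif (content : String) (if_start : Int) : Int :=
  pvALoop content.toList (content.toList.length + 1) if_start 0

-- ===== PORT B =====
-- B's tokenizer loop _scan_tags (fuel strictly exceeds the tag count: pos advances by ≥ 4 per tag)
def pvScanTags (cs : List Char) : Nat → Int → List (Int × List Char)
  | 0, _ => []
  | fuel + 1, pos =>
    if pos < (cs.length : Int) then
      let ts := PySem.Chars.findFrom cs "{%".toList pos none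
      if ts = -1 then []
      else
        let te0 := PySem.Chars.findFrom cs "%}".toList (ts + 2) none
        if te0 = -1 then []
        else
          let te := te0 + 2
          (te, pvTagBody cs ts te) :: pvScanTags cs fuel te
    else []

-- B's _kind
def pvKind (b : List Char) : Int :=
  if pvOpensIf b then 1 else if pvClosesIf b then -1 else 0

-- B's search loop: 'for j, (end, _) in enumerate(tags): if kinds[j] == -1 and sum(kinds[:j]) == 1: return end'
def pvBLoop (kinds : List Int) : List (Int × (Int × List Char)) → Int
  | [] => -1
  | (j, (e, _)) :: rest =>
    if PySem.List.pyGetD kinds j 0 = -1 ∧ (PySem.List.slice kinds none (some j)).sum = 1 then e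
    else pvBLoop kinds rest

def find_matching_endif_alt (content : String) (if_start : Int) : Int :=
  let cs := content.toList
  let tags := pvScanTags cs (cs.length + 1) if_start
  let kinds := tags.map (fun p => pvKind p.2)
  pvBLoop kinds (PySem.List.enumerate tags 0)

-- ===== PRECONDITION & SPEC =====
def Spec_find_matching_endif (content : String) (if_start : Int) (out : Int) : Prop := out = find_matching_endif_alt content if_start
instance (content : String) (if_start : Int) (out : Int) : Decidable (Spec_find_matching_endif content if_start out) := by unfold Spec_find_matching_endif; infer_instance

-- ===== CLAIM (what is proved, stated in full; the proofs are below) =====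
def Claim_equal_find_matching_endif : Prop := ∀ (content : String) (if_start : Int), Dom_find_matching_endif content if_start → Spec_find_matching_endif content if_start (find_matching_endif content if_start)

-- ===== LEMMAS AND PROOFS =====

-- proof-side interpreter: A's depth-counter loop replayed over a token list
def pvJ : List (Int × List Char) → Int → Int
  | [], _ => -1
  | (te, b) :: rest, d =>
    if pvOpensIf b then pvJ rest (d + 1)
    else if pvClosesIf b then
      if d - 1 = 0 then te else pvJ rest (d - 1)
    else pvJ rest d

theorem pvALoop_eq_pvJ (cs : List Char) :
    ∀ (fuel : Nat) (pos depth : Int),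
      pvALoop cs fuel pos depth = pvJ (pvScanTags cs fuel pos) depth := by
  intro fuel
  induction fuel with
  | zero => intro pos depth; simp [pvALoop, pvScanTags, pvJ]
  | succ f ih =>
    intro pos depth
    simp only [pvALoop, pvScanTags]
    by_cases hp : pos < (cs.length : Int)
    · simp only [if_pos hp]
      split_ifs <;> simp_all [pvJ]
    · simp [if_neg hp, pvJ]

-- B's search over enumerate, generalized to an arbitrary offset n into the kinds list,
-- equals A's depth-counter replay started at the prefix sum of the kinds before position n.
theorem pvBLoop_eq_pvJ (K : List Int) :
    ∀ (tags : List (Int × List Char)) (n : Nat) (d : Int),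
      K.drop n = tags.map (fun p => pvKind p.2) →
      (K.take n).sum = d →
      pvBLoop K (PySem.List.enumerate tags (n : Int)) = pvJ tags d := by
  intro tags
  induction tags with
  | nil => intro n d _ _; simp [pvBLoop, pvJ, PySem.List.enumerate]
  | cons hd tl ih =>
    intro n d hdrop hsum
    obtain ⟨te, b⟩ := hd
    have hn : n < K.length := by
      by_contra h
      rw [List.drop_eq_nil_of_le (by omega)] at hdrop
      simp at hdrop
    have hKn : K[n] = pvKind b := by
      have h0 : (K.drop n)[0]? = some (pvKind b) := by rw [hdrop]; simp
      rw [List.getElem?_drop] at h0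
      simpa [List.getElem?_eq_getElem hn] using h0
    have hdrop' : K.drop (n + 1) = tl.map (fun p => pvKind p.2) := by
      have : K.drop (n + 1) = (K.drop n).tail := by
        rw [List.tail_drop]
      rw [this, hdrop]
      simp
    have hsum' : (K.take (n + 1)).sum = d + pvKind b := by
      rw [List.take_add_one]
      simp [List.getElem?_eq_getElem hn, hKn, hsum]
    rw [PySem.List.enumerate_cons]
    simp only [pvBLoop, pvJ, PySem.List.pyGetD_natCast, PySem.List.slice_to_natCast,
      List.getD_eq_getElem?_getD, List.getElem?_eq_getElem hn, hKn, hsum, Option.getD_some]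
    have hrec := ih (n + 1) (d + pvKind b) hdrop' hsum'
    have hcast : ((n : Int) + 1) = ((n + 1 : Nat) : Int) := by push_cast; ring
    rw [hcast] at *
    by_cases h1 : pvOpensIf b
    · have : pvKind b = 1 := by simp [pvKind, h1]
      rw [if_neg (by rw [this]; omega), if_pos h1]
      rw [hrec, this]
    · by_cases h2 : pvClosesIf b
      · have hkb : pvKind b = -1 := by simp [pvKind, h1, h2]
        rw [if_neg h1, if_pos h2]
        by_cases hd1 : d = 1
        · rw [if_pos (by rw [hkb]; exact ⟨rfl, hd1⟩), if_pos (by omega)]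
        · rw [if_neg (by rw [hkb]; exact fun h => hd1 h.2), if_neg (by omega)]
          rw [hrec, hkb]; ring_nf
      · have hkb : pvKind b = 0 := by simp [pvKind, h1, h2]
        rw [if_neg (by rw [hkb]; exact fun h => absurd h.1 (by norm_num)),
          if_neg h1, if_neg h2]
        rw [hrec, hkb]; ring_nf

-- ===== VERDICT (by name: the statement is the Claim_ definition above) =====
theorem find_matching_endif_spec : Claim_equal_find_matching_endif := by
  intro content if_start _
  unfold Spec_find_matching_endif find_matching_endif find_matching_endif_alt
  rw [pvALoop_eq_pvJ]
  exact (pvBLoop_eq_pvJ _ _ 0 0 (by simp) (by simp)).symm
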